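-- pv_equiv track=rewrite | github.com/abhinavmall/PythonStuff | Mandarin.py | convert_to_mandarin
-- ===== SOURCE A (Python) =====
-- trans = {'0':'ling', '1':'yi', '2':'er', '3':'san', '4': 'si', '5':'wu', '6':'liu', '7':'qi', '8':'ba', '9':'jiu', '10': 'shi'}
--
-- def convert_to_mandarin(us_num):
--     '''
--     us_num, a string representing a US number 0 to 99
--     returns the string mandarin representation of us_num
--
--     Numbers in Mandarin follow 3 simple rules.
--     # There are words for each of the digits from 0 to 10.
--     # For numbers 11-19, the number is pronounced as "ten digit", so for example, 16 would be pronounced (using Mandarin) as "ten six".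
--     # For numbers between 20 and 99, the number is pronounced as “digit ten digit”, so for example, 37 would be pronounced (using Mandarin) as "three ten seven". If the digit is a zero, it is not included.
--     '''
--     mand_num = ''
--     length = len(us_num)
--     for i in range(length):
--         if i == 0:
--             #mand_num = trans[us_num[length - i - 1]] + mand_num
--             if us_num[length - 1 - i] == '0' and length != 1:
--                 mand_num = mand_num
--             else:
--                 mand_num = trans[us_num[length - i - 1]] + mand_num
--         elif i == 1:
--             if mand_num != '':
--                 mand_num = ' ' + mand_num
--             if us_num[length-i-1] == '1':
--                 mand_num = trans['10'] + mand_num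
--             else:
--                 mand_num = trans[us_num[length - i - 1]] + ' ' + trans['10'] + mand_num
--     return  mand_num
-- ===== SOURCE B (Python) =====
-- trans = {'0':'ling', '1':'yi', '2':'er', '3':'san', '4': 'si', '5':'wu', '6':'liu', '7':'qi', '8':'ba', '9':'jiu', '10': 'shi'}
--
-- def convert_to_mandarin(us_num):
--     if us_num == '':
--         return ''
--     if len(us_num) == 1:
--         return trans[us_num]
--     tens = us_num[len(us_num) - 2]
--     units = us_num[len(us_num) - 1]
--     parts = [trans['10']] if tens == '1' else [trans[tens], trans['10']]
--     if units != '0':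
--         parts.append(trans[units])
--     return ' '.join(parts)
-- ===== Notes on version B (the rewrite author's own statement) =====
-- stated objective: simpler
-- what changed: Replaces the reverse-index loop with conditional string prepending by direct positional access to the tens/units characters, building a list of word parts and joining them with ' '.
import Mathlib
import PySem

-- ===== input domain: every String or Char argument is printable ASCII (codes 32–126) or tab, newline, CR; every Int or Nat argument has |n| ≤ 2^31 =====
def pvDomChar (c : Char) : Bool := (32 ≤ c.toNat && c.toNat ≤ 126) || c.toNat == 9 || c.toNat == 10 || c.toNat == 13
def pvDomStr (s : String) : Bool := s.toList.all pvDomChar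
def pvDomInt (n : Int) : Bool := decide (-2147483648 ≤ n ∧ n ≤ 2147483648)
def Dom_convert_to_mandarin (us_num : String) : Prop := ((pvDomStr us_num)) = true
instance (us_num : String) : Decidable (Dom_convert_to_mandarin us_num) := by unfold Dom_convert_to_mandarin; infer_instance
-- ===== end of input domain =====

-- B replaces A's reverse-index loop with conditional prepending by direct positional
-- access to the tens/units characters plus a list-of-parts join (objective: simpler).

-- ===== PORT A =====
-- the module-level dict `trans`, keyed by (1- or 2-char) strings modelled as char lists
def pyTrans : PySem.Dict (List Char) (List Char) :=
  PySem.Dict.ofList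
    [(['0'], ['l','i','n','g']), (['1'], ['y','i']), (['2'], ['e','r']),
     (['3'], ['s','a','n']), (['4'], ['s','i']), (['5'], ['w','u']),
     (['6'], ['l','i','u']), (['7'], ['q','i']), (['8'], ['b','a']),
     (['9'], ['j','i','u']), (['1','0'], ['s','h','i'])]

-- trans[us_num[j]] : lookup of a single character; "" default is unreachable inside Pre_
def trA (c : Char) : List Char := PySem.Dict.getD pyTrans [c] []

-- A's loop, step for step, on the char list (strings are modelled as List Char)
def convA (cs : List Char) : List Char :=
  let length := cs.length
  (List.range length).foldl (fun mand_num i =>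
    if i = 0 then
      if cs.getD (length - 1 - i) ' ' = '0' ∧ length ≠ 1 then mand_num
      else trA (cs.getD (length - i - 1) ' ') ++ mand_num
    else if i = 1 then
      let mand_num := if mand_num ≠ ([] : List Char) then ' ' :: mand_num else mand_num
      if cs.getD (length - i - 1) ' ' = '1' then PySem.Dict.getD pyTrans ['1','0'] [] ++ mand_num
      else trA (cs.getD (length - i - 1) ' ') ++ ' ' :: (PySem.Dict.getD pyTrans ['1','0'] [] ++ mand_num)
    else mand_num) []

def convert_to_mandarin (us_num : String) : String := String.ofList (convA us_num.toList)

-- ===== PORT B =====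
def convB (cs : List Char) : List Char :=
  if cs = [] then []
  else if cs.length = 1 then PySem.Dict.getD pyTrans cs []
  else
    let tens := cs.getD (cs.length - 2) ' '
    let units := cs.getD (cs.length - 1) ' '
    let parts := if tens = '1' then [PySem.Dict.getD pyTrans ['1','0'] []]
                 else [trA tens, PySem.Dict.getD pyTrans ['1','0'] []]
    let parts := if units ≠ '0' then parts ++ [trA units] else parts
    PySem.Chars.join [' '] parts

def convert_to_mandarin_alt (us_num : String) : String := String.ofList (convB us_num.toList)

-- ===== PRECONDITION & SPEC =====
def pyDigits : List Char := ['0','1','2','3','4','5','6','7','8','9']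

-- Pre_ excludes exactly the inputs on which A raises KeyError: the characters A actually
-- looks up (the last one, and the second-to-last one, when present) must be decimal digits.
def Pre_convert_to_mandarin (us_num : String) : Prop :=
  (us_num.toList.length = 1 → us_num.toList.getD 0 ' ' ∈ pyDigits) ∧
  (2 ≤ us_num.toList.length →
    us_num.toList.getD (us_num.toList.length - 1) ' ' ∈ pyDigits ∧
    us_num.toList.getD (us_num.toList.length - 2) ' ' ∈ pyDigits)
instance (us_num : String) : Decidable (Pre_convert_to_mandarin us_num) := by
  unfold Pre_convert_to_mandarin; infer_instance

def pvWitness_convert_to_mandarin : String := "37"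

def Spec_convert_to_mandarin (us_num : String) (out : String) : Prop := out = convert_to_mandarin_alt us_num
instance (us_num : String) (out : String) : Decidable (Spec_convert_to_mandarin us_num out) := by unfold Spec_convert_to_mandarin; infer_instance

-- ===== CLAIM (what is proved, stated in full; the proofs are below) =====
def Claim_equal_convert_to_mandarin : Prop := ∀ (us_num : String), Dom_convert_to_mandarin us_num → Pre_convert_to_mandarin us_num → Spec_convert_to_mandarin us_num (convert_to_mandarin us_num)

-- ===== LEMMAS AND PROOFS =====

-- a foldl over range n only uses steps 0 and 1 when f is the identity from step 2 on
lemma foldl_range_two {α : Type} (f : α → Nat → α) (init : α)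
    (hf : ∀ m i, 2 ≤ i → f m i = m) :
    ∀ n, 2 ≤ n → (List.range n).foldl f init = f (f init 0) 1 := by
  intro n hn
  induction n with
  | zero => omega
  | succ k ih =>
    rcases Nat.lt_or_ge k 2 with hk | hk
    · interval_cases k
      · omega
      · simp [List.range_succ]
    · rw [List.range_succ, List.foldl_append, ih hk]
      simp [hf _ k hk]

lemma getD_last_two_right (r : List Char) (t u d : Char) :
    (r ++ [t, u]).getD (r.length + 1) d = u := by
  simp

lemma getD_last_two_left (r : List Char) (t u d : Char) :
    (r ++ [t, u]).getD r.length d = t := by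
  simp

lemma exists_last_two (cs : List Char) (h : 2 ≤ cs.length) :
    ∃ r t u, cs = r ++ [t, u] := by
  rcases hr : cs.reverse with _ | ⟨u, _ | ⟨t, r'⟩⟩
  · simp at hr; simp [hr] at h
  · have : cs = [u] := by
      have := congrArg List.reverse hr; simpa using this
    simp [this] at h
  · refine ⟨r'.reverse, t, u, ?_⟩
    have := congrArg List.reverse hr
    simpa using this

lemma convA_two (r : List Char) (t u : Char) :
    convA (r ++ [t, u]) =
      (let m0 := if u = '0' then ([] : List Char) else trA u
       let m1 := if m0 ≠ ([] : List Char) then ' ' :: m0 else m0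
       if t = '1' then PySem.Dict.getD pyTrans ['1','0'] [] ++ m1
       else trA t ++ ' ' :: (PySem.Dict.getD pyTrans ['1','0'] [] ++ m1)) := by
  have hlen : (r ++ [t, u]).length = r.length + 2 := by simp
  unfold convA
  rw [hlen]
  rw [foldl_range_two _ _ (by intro m i hi; simp [show i ≠ 0 by omega, show i ≠ 1 by omega]) _ (by omega)]
  have h1 : r.length + 2 - 1 - 0 = r.length + 1 := by omega
  have h2 : r.length + 2 - 0 - 1 = r.length + 1 := by omega
  have h3 : r.length + 2 - 1 - 1 = r.length := by omega
  simp only [h1, h2, h3, getD_last_two_right, getD_last_two_left,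
    show r.length + 2 ≠ 1 by omega, if_pos, ne_eq, not_false_eq_true, and_true]
  simp

lemma convB_two (r : List Char) (t u : Char) :
    convB (r ++ [t, u]) =
      (let parts := if t = '1' then [PySem.Dict.getD pyTrans ['1','0'] []]
                    else [trA t, PySem.Dict.getD pyTrans ['1','0'] []]
       let parts := if u ≠ '0' then parts ++ [trA u] else parts
       PySem.Chars.join [' '] parts) := by
  have hlen : (r ++ [t, u]).length = r.length + 2 := by simp
  unfold convB
  rw [if_neg (by simp), hlen]
  rw [if_neg (by omega)]
  have h1 : r.length + 2 - 2 = r.length := by omega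
  have h2 : r.length + 2 - 1 = r.length + 1 := by omega
  simp only [h1, h2, getD_last_two_right, getD_last_two_left]

lemma conv_eq (cs : List Char)
    (h1 : cs.length = 1 → cs.getD 0 ' ' ∈ pyDigits)
    (h2 : 2 ≤ cs.length →
      cs.getD (cs.length - 1) ' ' ∈ pyDigits ∧ cs.getD (cs.length - 2) ' ' ∈ pyDigits) :
    convA cs = convB cs := by
  match cs, h1, h2 with
  | [], _, _ => rfl
  | [c], h1, _ =>
    have hc : c ∈ pyDigits := h1 rfl
    fin_cases hc <;> rfl
  | (a :: b :: rest), _, h2 =>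
    obtain ⟨r, t, u, hcs⟩ := exists_last_two (a :: b :: rest) (by simp)
    rw [hcs] at h2 ⊢
    have hlen : (r ++ [t, u]).length = r.length + 2 := by simp
    obtain ⟨hu, ht⟩ := h2 (by omega)
    rw [hlen, show r.length + 2 - 1 = r.length + 1 by omega, getD_last_two_right] at hu
    rw [hlen, show r.length + 2 - 2 = r.length by omega, getD_last_two_left] at ht
    rw [convA_two, convB_two]
    fin_cases ht <;> fin_cases hu <;> rfl

-- ===== VERDICT (by name: the statement is the Claim_ definition above) =====
theorem convert_to_mandarin_spec : Claim_equal_convert_to_mandarin := by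
  intro us_num _ hpre
  unfold Spec_convert_to_mandarin convert_to_mandarin convert_to_mandarin_alt
  exact congrArg String.ofList (conv_eq us_num.toList hpre.1 hpre.2)
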